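-- pv_equiv track=rewrite | github.com/jeury301/python-morsels | 14. lstrip/lstrip_solutions.py | v6_lstrip
-- ===== SOURCE A (Python) =====
-- def v6_lstrip(iterable, strip_value):
--     """Return iterable with strip_value items removed from beginning.
--
--     Bonus 1: We're supposed to make lstrip return an iterator.
--     """
--     iterator = iter(iterable)
--     for item in iterator:
--         if item != strip_value:
--             yield item
--             break
--     for item in iterator:
--         yield item
-- ===== SOURCE B (Python) =====
-- def v6_lstrip(iterable, strip_value):
--     """Yield iterable with leading strip_value items removed.
--
--     Strategy: materialize, compute the cut index (first position whose item
--     differs from strip_value) with enumerate/next, then yield the slice.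
--     """
--     items = list(iterable)
--     start = next((i for i, x in enumerate(items) if x != strip_value), len(items))
--     yield from items[start:]
-- ===== Notes on version B (the rewrite author's own statement) =====
-- stated objective: alternative
-- what changed: Instead of A's lazy skip-then-relay loops over the iterator, B materializes the input, computes a cut index via enumerate/next (first position differing from strip_value, defaulting to len), and yields a single slice from that index.
import Mathlib
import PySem

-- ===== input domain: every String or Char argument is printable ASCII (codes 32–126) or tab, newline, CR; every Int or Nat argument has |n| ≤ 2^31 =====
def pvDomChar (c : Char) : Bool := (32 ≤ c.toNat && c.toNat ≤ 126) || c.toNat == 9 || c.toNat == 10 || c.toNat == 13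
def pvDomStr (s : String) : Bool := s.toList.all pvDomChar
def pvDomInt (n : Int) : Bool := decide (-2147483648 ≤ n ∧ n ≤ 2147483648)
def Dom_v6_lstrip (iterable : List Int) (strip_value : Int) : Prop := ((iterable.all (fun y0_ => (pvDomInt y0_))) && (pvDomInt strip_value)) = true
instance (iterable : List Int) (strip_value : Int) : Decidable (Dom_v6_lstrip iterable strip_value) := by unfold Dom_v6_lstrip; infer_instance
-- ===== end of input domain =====

-- B replaces A's lazy skip-then-relay loops with an eager cut-index computed by enumerate/next
-- followed by one slice (B consumes the iterable eagerly; equivalence is about the yielded values).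


-- ===== PORT A =====
-- first loop: advance the iterator while item == strip_value; on the first item ≠ strip_value,
-- yield it and break; the second loop yields the remainder of the iterator (the list tail).
def v6_lstrip (iterable : List Int) (strip_value : Int) : List Int :=
  match iterable with
  | [] => []
  | x :: xs => if x ≠ strip_value then x :: xs else v6_lstrip xs strip_value

-- ===== PORT B =====
-- Source B: start = next((i for i, x in enumerate(items) if x != strip_value), len(items));
--       yield from items[start:]
def v6_lstrip_alt (iterable : List Int) (strip_value : Int) : List Int :=
  let start : Int :=
    (((PySem.List.enumerate iterable 0).find? (fun p => p.2 != strip_value)).map Prod.fst).getD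
      (iterable.length : Int)
  PySem.List.slice iterable (some start) none

-- ===== PRECONDITION & SPEC =====
def Spec_v6_lstrip (iterable : List Int) (strip_value : Int) (out : List Int) : Prop := out = v6_lstrip_alt iterable strip_value
instance (iterable : List Int) (strip_value : Int) (out : List Int) : Decidable (Spec_v6_lstrip iterable strip_value out) := by unfold Spec_v6_lstrip; infer_instance

-- ===== CLAIM =====
def Claim_equal_v6_lstrip : Prop := ∀ (iterable : List Int) (strip_value : Int), Dom_v6_lstrip iterable strip_value → Spec_v6_lstrip iterable strip_value (v6_lstrip iterable strip_value)

-- ===== LEMMAS AND PROOFS =====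
-- The enumerate/next search computes s + findIdx (item ≠ strip_value).
theorem find_enumerate_eq_findIdx (xs : List Int) (sv : Int) (s : Nat) :
    (((PySem.List.enumerate xs (s : Int)).find? (fun p => p.2 != sv)).map Prod.fst).getD
      ((s : Int) + xs.length)
    = (s : Int) + (xs.findIdx (fun x => x != sv) : Nat) := by
  induction xs generalizing s with
  | nil => simp [PySem.List.enumerate_nil, List.findIdx]
  | cons x xs ih =>
    rw [PySem.List.enumerate_cons]
    by_cases h : x = sv
    · have hb : (x != sv) = false := by simp [h]
      have hthis := ih (s + 1)
      simp only [List.find?, hb, List.findIdx_cons, cond_false, List.length_cons]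
      have hlen : (s : Int) + ((xs.length + 1 : Nat) : Int) = ((s + 1 : Nat) : Int) + (xs.length : Nat) := by
        push_cast; ring
      rw [hlen, show ((s : Int) + 1) = ((s + 1 : Nat) : Int) by push_cast; ring, hthis]
      push_cast; ring
    · have hb : (x != sv) = true := by simp [h]
      simp [List.find?, hb, List.findIdx_cons]

theorem alt_eq_drop (iterable : List Int) (sv : Int) :
    v6_lstrip_alt iterable sv = iterable.drop (iterable.findIdx (fun x => x != sv)) := by
  have h0 := find_enumerate_eq_findIdx iterable sv 0
  simp only [Nat.cast_zero, zero_add] at h0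
  simp only [v6_lstrip_alt]
  rw [h0, PySem.List.slice_from_natCast]

theorem a_eq_drop (iterable : List Int) (sv : Int) :
    v6_lstrip iterable sv = iterable.drop (iterable.findIdx (fun x => x != sv)) := by
  induction iterable with
  | nil => rfl
  | cons x xs ih =>
    by_cases h : x = sv
    · have hb : (x != sv) = false := by simp [h]
      simp [v6_lstrip, h, List.findIdx_cons, ih]
    · have hb : (x != sv) = true := by simp [h]
      simp [v6_lstrip, h, List.findIdx_cons, hb]

-- ===== VERDICT =====
theorem v6_lstrip_spec : Claim_equal_v6_lstrip := by
  intro iterable sv _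
  unfold Spec_v6_lstrip
  rw [a_eq_drop, alt_eq_drop]
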